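-- pv_equiv track=rewrite | github.com/NDGopher/PredictionInsider | pnl_analysis/analyze_trader.py | get_sport
-- ===== SOURCE A (Python) =====
-- def get_sport(row):
--     comb = (str(row.get("eventSlug", "") or "") + " " + str(row.get("slug", "") or "") + " " + str(row.get("title", "") or "")).lower()
--     if "epl-" in comb or "premier-league" in comb or "premier league" in comb: return "SOCCER (EPL)"
--     if "lal-" in comb or "la-liga" in comb or "la liga" in comb:               return "SOCCER (LaLiga)"
--     if "ucl-" in comb or "champions-league" in comb or "champions league" in comb: return "SOCCER (UCL)"
--     if "serie-a" in comb or "seri-a" in comb:                                   return "SOCCER (SerieA)"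
--     if any(x in comb for x in ["bundesliga", "bun-", "fl1-", "ligue-1", "ligue1", "eredivisie", "mls-", "sea-", "csa-", "arg-", "bra-", "mex-"]): return "SOCCER (Other)"
--     if any(x in comb for x in ["soccer", "football-", " fc ", "united", "athletic", "sporting"]): return "SOCCER (Other)"
--     # WNBA slugs are "wnba-..." — they contain the substring "nba-" (e.g. wnba-phx-min → …nba-…).
--     # Classify WNBA before the generic NBA rule or the whole league is mislabeled as NBA.
--     if "wnba-" in comb:                                                         return "WNBA"
--     if any(x in comb for x in ["nba-", "basketball", "nba:"]):                  return "NBA"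
--     if any(x in comb for x in ["nfl-", "super-bowl", "cfb-"]):                  return "NFL"
--     if any(x in comb for x in ["nhl-", "hockey"]):                              return "NHL"
--     if any(x in comb for x in ["mlb-", "baseball"]):                            return "MLB"
--     if any(x in comb for x in ["tennis", "atp-", "wta-", "wimbledon", "us-open", "french-open", "australian-open"]): return "TENNIS"
--     if any(x in comb for x in ["lol-", "cs2", "esports", "dota", "iem-", "pgl-", "valorant"]): return "ESPORTS"
--     if any(x in comb for x in ["election", "presidential", "nominee", "senate", "congress", "parliament", "governor"]): return "POLITICS"
--     return "OTHER"
-- ===== SOURCE B (Python) =====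
-- # Position-scan classifier: instead of testing rule conditions one by one with substring
-- # searches, scan the combined string once position by position, matching every pattern as a
-- # prefix at each position and keeping the smallest (highest-priority) rule index matched.
-- _LABELS = ["SOCCER (EPL)", "SOCCER (LaLiga)", "SOCCER (UCL)", "SOCCER (SerieA)",
--            "SOCCER (Other)", "SOCCER (Other)", "WNBA", "NBA", "NFL", "NHL", "MLB",
--            "TENNIS", "ESPORTS", "POLITICS"]
-- _PATTERNS = (
--     [(p, 0) for p in ["epl-", "premier-league", "premier league"]]
--     + [(p, 1) for p in ["lal-", "la-liga", "la liga"]]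
--     + [(p, 2) for p in ["ucl-", "champions-league", "champions league"]]
--     + [(p, 3) for p in ["serie-a", "seri-a"]]
--     + [(p, 4) for p in ["bundesliga", "bun-", "fl1-", "ligue-1", "ligue1", "eredivisie", "mls-", "sea-", "csa-", "arg-", "bra-", "mex-"]]
--     + [(p, 5) for p in ["soccer", "football-", " fc ", "united", "athletic", "sporting"]]
--     + [(p, 6) for p in ["wnba-"]]
--     + [(p, 7) for p in ["nba-", "basketball", "nba:"]]
--     + [(p, 8) for p in ["nfl-", "super-bowl", "cfb-"]]
--     + [(p, 9) for p in ["nhl-", "hockey"]]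
--     + [(p, 10) for p in ["mlb-", "baseball"]]
--     + [(p, 11) for p in ["tennis", "atp-", "wta-", "wimbledon", "us-open", "french-open", "australian-open"]]
--     + [(p, 12) for p in ["lol-", "cs2", "esports", "dota", "iem-", "pgl-", "valorant"]]
--     + [(p, 13) for p in ["election", "presidential", "nominee", "senate", "congress", "parliament", "governor"]]
-- )
--
-- def get_sport(row):
--     comb = (str(row.get("eventSlug", "") or "") + " " + str(row.get("slug", "") or "") + " " + str(row.get("title", "") or "")).lower()
--     best = 14
--     for i in range(len(comb)):
--         for p, r in _PATTERNS:
--             if r < best and comb.startswith(p, i):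
--                 best = r
--     return _LABELS[best] if best < 14 else "OTHER"
-- ===== Notes on version B (the rewrite author's own statement) =====
-- stated objective: alternative
-- what changed: Replaces A's branch-by-branch substring searches with a single position scan over the combined string: every pattern is matched as a prefix at each position and the smallest (highest-priority) rule index seen anywhere wins, the label being looked up in a table at the end.
import Mathlib
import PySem

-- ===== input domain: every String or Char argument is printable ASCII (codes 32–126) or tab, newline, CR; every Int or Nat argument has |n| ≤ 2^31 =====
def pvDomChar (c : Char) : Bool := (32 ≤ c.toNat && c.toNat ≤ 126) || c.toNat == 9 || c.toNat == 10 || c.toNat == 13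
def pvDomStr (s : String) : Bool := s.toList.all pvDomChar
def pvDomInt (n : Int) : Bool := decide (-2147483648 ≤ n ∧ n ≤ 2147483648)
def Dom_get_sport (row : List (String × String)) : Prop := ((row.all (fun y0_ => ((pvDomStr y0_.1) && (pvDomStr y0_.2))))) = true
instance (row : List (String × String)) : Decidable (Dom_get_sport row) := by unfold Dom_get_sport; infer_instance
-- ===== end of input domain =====

-- B replaces A's branch-by-branch substring searches by a single position scan keeping the
-- smallest matched rule index (alternative decomposition; same asymptotic cost).


-- ===== PORT A =====
-- str(row.get(k, "") or ""): values are strings, so `v or ""` is v itself (and "" when missing/empty) = Dict.getD row k "".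
def get_sport (row : List (String × String)) : String :=
  let comb := PySem.Str.lower ((PySem.Dict.getD ⟨row⟩ "eventSlug" "") ++ " " ++ (PySem.Dict.getD ⟨row⟩ "slug" "") ++ " " ++ (PySem.Dict.getD ⟨row⟩ "title" ""))
  if PySem.Str.isIn "epl-" comb || PySem.Str.isIn "premier-league" comb || PySem.Str.isIn "premier league" comb then "SOCCER (EPL)"
  else if PySem.Str.isIn "lal-" comb || PySem.Str.isIn "la-liga" comb || PySem.Str.isIn "la liga" comb then "SOCCER (LaLiga)"
  else if PySem.Str.isIn "ucl-" comb || PySem.Str.isIn "champions-league" comb || PySem.Str.isIn "champions league" comb then "SOCCER (UCL)"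
  else if PySem.Str.isIn "serie-a" comb || PySem.Str.isIn "seri-a" comb then "SOCCER (SerieA)"
  else if ["bundesliga", "bun-", "fl1-", "ligue-1", "ligue1", "eredivisie", "mls-", "sea-", "csa-", "arg-", "bra-", "mex-"].any (fun x => PySem.Str.isIn x comb) then "SOCCER (Other)"
  else if ["soccer", "football-", " fc ", "united", "athletic", "sporting"].any (fun x => PySem.Str.isIn x comb) then "SOCCER (Other)"
  else if PySem.Str.isIn "wnba-" comb then "WNBA"
  else if ["nba-", "basketball", "nba:"].any (fun x => PySem.Str.isIn x comb) then "NBA"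
  else if ["nfl-", "super-bowl", "cfb-"].any (fun x => PySem.Str.isIn x comb) then "NFL"
  else if ["nhl-", "hockey"].any (fun x => PySem.Str.isIn x comb) then "NHL"
  else if ["mlb-", "baseball"].any (fun x => PySem.Str.isIn x comb) then "MLB"
  else if ["tennis", "atp-", "wta-", "wimbledon", "us-open", "french-open", "australian-open"].any (fun x => PySem.Str.isIn x comb) then "TENNIS"
  else if ["lol-", "cs2", "esports", "dota", "iem-", "pgl-", "valorant"].any (fun x => PySem.Str.isIn x comb) then "ESPORTS"
  else if ["election", "presidential", "nominee", "senate", "congress", "parliament", "governor"].any (fun x => PySem.Str.isIn x comb) then "POLITICS"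
  else "OTHER"

-- ===== PORT B =====
-- Source B's _LABELS table.
def pvLabels : List String :=
  ["SOCCER (EPL)", "SOCCER (LaLiga)", "SOCCER (UCL)", "SOCCER (SerieA)",
   "SOCCER (Other)", "SOCCER (Other)", "WNBA", "NBA", "NFL", "NHL", "MLB",
   "TENNIS", "ESPORTS", "POLITICS"]

-- Source B's flat _PATTERNS table: (pattern, rule index).
def pvPatterns : List (String × Nat) :=
  [("epl-", 0), ("premier-league", 0), ("premier league", 0),
   ("lal-", 1), ("la-liga", 1), ("la liga", 1),
   ("ucl-", 2), ("champions-league", 2), ("champions league", 2),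
   ("serie-a", 3), ("seri-a", 3),
   ("bundesliga", 4), ("bun-", 4), ("fl1-", 4), ("ligue-1", 4), ("ligue1", 4), ("eredivisie", 4), ("mls-", 4), ("sea-", 4), ("csa-", 4), ("arg-", 4), ("bra-", 4), ("mex-", 4),
   ("soccer", 5), ("football-", 5), (" fc ", 5), ("united", 5), ("athletic", 5), ("sporting", 5),
   ("wnba-", 6),
   ("nba-", 7), ("basketball", 7), ("nba:", 7),
   ("nfl-", 8), ("super-bowl", 8), ("cfb-", 8),
   ("nhl-", 9), ("hockey", 9),
   ("mlb-", 10), ("baseball", 10),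
   ("tennis", 11), ("atp-", 11), ("wta-", 11), ("wimbledon", 11), ("us-open", 11), ("french-open", 11), ("australian-open", 11),
   ("lol-", 12), ("cs2", 12), ("esports", 12), ("dota", 12), ("iem-", 12), ("pgl-", 12), ("valorant", 12),
   ("election", 13), ("presidential", 13), ("nominee", 13), ("senate", 13), ("congress", 13), ("parliament", 13), ("governor", 13)]

-- the nested loop of Source B: for i in range(len(comb)): for (p, r) in _PATTERNS: if r < best and comb.startswith(p, i): best = r
-- (ASCII domain: comb.startswith(p, i) is exactly `p.toList.isPrefixOf (comb.toList.drop i)`; the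
--  loop index i ≥ 0 of range(len(comb)) is kept as a Nat.)
def pvScan (cs : List Char) : Nat :=
  (List.range cs.length).foldl
    (fun best i =>
      pvPatterns.foldl
        (fun best pr => if pr.2 < best && pr.1.toList.isPrefixOf (cs.drop i) then pr.2 else best)
        best)
    14

def get_sport_alt (row : List (String × String)) : String :=
  let comb := PySem.Str.lower ((PySem.Dict.getD ⟨row⟩ "eventSlug" "") ++ " " ++ (PySem.Dict.getD ⟨row⟩ "slug" "") ++ " " ++ (PySem.Dict.getD ⟨row⟩ "title" ""))
  let best := pvScan comb.toList
  if best < 14 then pvLabels.getD best "OTHER" else "OTHER"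

-- ===== PRECONDITION & SPEC =====
def Spec_get_sport (row : List (String × String)) (out : String) : Prop := out = get_sport_alt row
instance (row : List (String × String)) (out : String) : Decidable (Spec_get_sport row out) := by unfold Spec_get_sport; infer_instance

-- ===== CLAIM (what is proved, stated in full; the proofs are below) =====
def Claim_equal_get_sport : Prop := ∀ (row : List (String × String)), Dom_get_sport row → Spec_get_sport row (get_sport row)

-- ===== LEMMAS AND PROOFS =====

-- A's 14 branch conditions, verbatim, indexed.
def pvCondA (comb : String) : Nat → Bool
  | 0 => PySem.Str.isIn "epl-" comb || PySem.Str.isIn "premier-league" comb || PySem.Str.isIn "premier league" comb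
  | 1 => PySem.Str.isIn "lal-" comb || PySem.Str.isIn "la-liga" comb || PySem.Str.isIn "la liga" comb
  | 2 => PySem.Str.isIn "ucl-" comb || PySem.Str.isIn "champions-league" comb || PySem.Str.isIn "champions league" comb
  | 3 => PySem.Str.isIn "serie-a" comb || PySem.Str.isIn "seri-a" comb
  | 4 => ["bundesliga", "bun-", "fl1-", "ligue-1", "ligue1", "eredivisie", "mls-", "sea-", "csa-", "arg-", "bra-", "mex-"].any (fun x => PySem.Str.isIn x comb)
  | 5 => ["soccer", "football-", " fc ", "united", "athletic", "sporting"].any (fun x => PySem.Str.isIn x comb)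
  | 6 => PySem.Str.isIn "wnba-" comb
  | 7 => ["nba-", "basketball", "nba:"].any (fun x => PySem.Str.isIn x comb)
  | 8 => ["nfl-", "super-bowl", "cfb-"].any (fun x => PySem.Str.isIn x comb)
  | 9 => ["nhl-", "hockey"].any (fun x => PySem.Str.isIn x comb)
  | 10 => ["mlb-", "baseball"].any (fun x => PySem.Str.isIn x comb)
  | 11 => ["tennis", "atp-", "wta-", "wimbledon", "us-open", "french-open", "australian-open"].any (fun x => PySem.Str.isIn x comb)
  | 12 => ["lol-", "cs2", "esports", "dota", "iem-", "pgl-", "valorant"].any (fun x => PySem.Str.isIn x comb)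
  | 13 => ["election", "presidential", "nominee", "senate", "congress", "parliament", "governor"].any (fun x => PySem.Str.isIn x comb)
  | _ => false

-- "some pattern of rule r occurs somewhere in cs"
def pvRuleHit (cs : List Char) (r : Nat) : Prop :=
  ∃ p i, (p, r) ∈ pvPatterns ∧ p.toList <+: cs.drop i

lemma pvPatterns_fst_ne_nil : ∀ pr ∈ pvPatterns, pr.1.toList ≠ [] := by decide

lemma pvPatterns_snd_lt : ∀ pr ∈ pvPatterns, pr.2 < 14 := by decide

lemma pvRuleHit_iff_any (cs : List Char) (r : Nat) :
    pvRuleHit cs r ↔ (pvPatterns.any (fun pr => pr.2 == r && PySem.Chars.isIn pr.1.toList cs)) = true := by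
  rw [List.any_eq_true]
  constructor
  · rintro ⟨p, i, hm, hp⟩
    refine ⟨(p, r), hm, ?_⟩
    simp [(PySem.Chars.exists_prefix_drop_iff_isIn p.toList cs).mp ⟨i, hp⟩]
  · rintro ⟨⟨p, r'⟩, hm, h⟩
    simp only [Bool.and_eq_true, beq_iff_eq] at h
    obtain ⟨hr, hIn⟩ := h
    obtain ⟨i, hp⟩ := (PySem.Chars.exists_prefix_drop_iff_isIn p.toList cs).mpr hIn
    exact ⟨p, i, hr ▸ hm, hp⟩

lemma pvCondB_eq (comb : String) (r : Nat) :
    (pvPatterns.any (fun pr => pr.2 == r && PySem.Chars.isIn pr.1.toList comb.toList)) = pvCondA comb r := by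
  rcases r with _|_|_|_|_|_|_|_|_|_|_|_|_|_|r
  case succ =>
    rw [show pvCondA comb (r + 14) = false from rfl]
    rw [List.any_eq_false]
    rintro ⟨p, r'⟩ hm
    have hlt : r' < 14 := pvPatterns_snd_lt (p, r') hm
    simp only [Bool.and_eq_true, beq_iff_eq, not_and]
    intro h; omega
  all_goals
    simp [pvPatterns, pvCondA, PySem.Str.isIn_eq, Bool.or_assoc]

lemma pvHit_iff (comb : String) (r : Nat) :
    pvRuleHit comb.toList r ↔ pvCondA comb r = true := by
  rw [pvRuleHit_iff_any, pvCondB_eq]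

lemma pvInner_le (l : List Char) (pats : List (String × Nat)) (b : Nat) :
    pats.foldl (fun best pr => if pr.2 < best && pr.1.toList.isPrefixOf l then pr.2 else best) b ≤ b := by
  induction pats generalizing b with
  | nil => simp
  | cons a t ih =>
      simp only [List.foldl_cons]
      refine le_trans (ih _) ?_
      by_cases h : (a.2 < b && a.1.toList.isPrefixOf l) = true
      · rw [if_pos h]
        simp only [Bool.and_eq_true, decide_eq_true_eq] at h
        exact le_of_lt h.1
      · rw [if_neg h]

lemma pvInner_le_mem (l : List Char) (pats : List (String × Nat)) (b : Nat)
    (p : String) (r : Nat) (hmem : (p, r) ∈ pats) (hpre : p.toList.isPrefixOf l = true) :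
    pats.foldl (fun best pr => if pr.2 < best && pr.1.toList.isPrefixOf l then pr.2 else best) b ≤ r := by
  induction pats generalizing b with
  | nil => cases hmem
  | cons a t ih =>
      simp only [List.foldl_cons]
      rcases List.mem_cons.mp hmem with h | h
      · subst h
        simp only [hpre, Bool.and_true]
        by_cases hlt : r < b
        · simp only [hlt, decide_true, if_true]
          exact pvInner_le l t r
        · simp only [hlt, decide_false]
          exact le_trans (pvInner_le l t b) (Nat.le_of_not_lt hlt)
      · exact ih _ h

lemma pvInner_cases (l : List Char) (pats : List (String × Nat)) (b : Nat) :
    pats.foldl (fun best pr => if pr.2 < best && pr.1.toList.isPrefixOf l then pr.2 else best) b = b ∨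
      ∃ p r, (p, r) ∈ pats ∧ p.toList.isPrefixOf l = true ∧
        pats.foldl (fun best pr => if pr.2 < best && pr.1.toList.isPrefixOf l then pr.2 else best) b = r := by
  induction pats generalizing b with
  | nil => left; simp
  | cons a t ih =>
      simp only [List.foldl_cons]
      by_cases h : (a.2 < b && a.1.toList.isPrefixOf l) = true
      · rw [if_pos h]
        rcases ih a.2 with h1 | ⟨p, r, hm, hp, he⟩
        · right
          exact ⟨a.1, a.2, List.mem_cons_self .., (by simpa using h : _ ∧ _).2, h1⟩
        · right; exact ⟨p, r, List.mem_cons_of_mem _ hm, hp, he⟩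
      · rw [if_neg h]
        rcases ih b with h1 | ⟨p, r, hm, hp, he⟩
        · left; exact h1
        · right; exact ⟨p, r, List.mem_cons_of_mem _ hm, hp, he⟩

lemma pvOuter_le (cs : List Char) (is : List Nat) (b : Nat) :
    is.foldl (fun best i => pvPatterns.foldl
      (fun best pr => if pr.2 < best && pr.1.toList.isPrefixOf (cs.drop i) then pr.2 else best) best) b ≤ b := by
  induction is generalizing b with
  | nil => simp
  | cons a t ih =>
      simp only [List.foldl_cons]
      exact le_trans (ih _) (pvInner_le _ _ _)

lemma pvOuter_le_mem (cs : List Char) (is : List Nat) (b : Nat) (i : Nat) (p : String) (r : Nat)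
    (hi : i ∈ is) (hmem : (p, r) ∈ pvPatterns) (hpre : p.toList.isPrefixOf (cs.drop i) = true) :
    is.foldl (fun best i => pvPatterns.foldl
      (fun best pr => if pr.2 < best && pr.1.toList.isPrefixOf (cs.drop i) then pr.2 else best) best) b ≤ r := by
  induction is generalizing b with
  | nil => cases hi
  | cons a t ih =>
      simp only [List.foldl_cons]
      rcases List.mem_cons.mp hi with h | h
      · subst h
        exact le_trans (pvOuter_le cs t _) (pvInner_le_mem _ _ _ p r hmem hpre)
      · exact ih _ h

lemma pvOuter_cases (cs : List Char) (is : List Nat) (b : Nat) :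
    is.foldl (fun best i => pvPatterns.foldl
      (fun best pr => if pr.2 < best && pr.1.toList.isPrefixOf (cs.drop i) then pr.2 else best) best) b = b ∨
    ∃ p r, (p, r) ∈ pvPatterns ∧ (∃ i, p.toList.isPrefixOf (cs.drop i) = true) ∧
      is.foldl (fun best i => pvPatterns.foldl
        (fun best pr => if pr.2 < best && pr.1.toList.isPrefixOf (cs.drop i) then pr.2 else best) best) b = r := by
  induction is generalizing b with
  | nil => left; simp
  | cons a t ih =>
      simp only [List.foldl_cons]
      rcases ih (pvPatterns.foldl
          (fun best pr => if pr.2 < best && pr.1.toList.isPrefixOf (cs.drop a) then pr.2 else best) b) with h1 | ⟨p, r, hm, hp, he⟩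
      · rw [h1]
        rcases pvInner_cases (cs.drop a) pvPatterns b with h2 | ⟨p, r, hm, hp, he⟩
        · left; exact h2
        · right; exact ⟨p, r, hm, ⟨a, hp⟩, he⟩
      · right; exact ⟨p, r, hm, hp, he⟩

lemma pvScan_le (cs : List Char) : pvScan cs ≤ 14 :=
  pvOuter_le cs _ 14

lemma pvScan_min (cs : List Char) (r : Nat) (h : pvRuleHit cs r) : pvScan cs ≤ r := by
  obtain ⟨p, i, hmem, hpre⟩ := h
  have hne : p.toList ≠ [] := pvPatterns_fst_ne_nil (p, r) hmem
  have hilt : i < cs.length := by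
    by_contra hge
    have : cs.drop i = [] := List.drop_eq_nil_of_le (Nat.le_of_not_lt hge)
    rw [this] at hpre
    exact hne (List.prefix_nil.mp hpre)
  exact pvOuter_le_mem cs _ 14 i p r (List.mem_range.mpr hilt) hmem
    (List.isPrefixOf_iff_prefix.mpr hpre)

lemma pvScan_cases (cs : List Char) : pvScan cs = 14 ∨ pvRuleHit cs (pvScan cs) := by
  rcases pvOuter_cases cs (List.range cs.length) 14 with h | ⟨p, r, hm, ⟨i, hp⟩, he⟩
  · left; exact h
  · right
    rw [show pvScan cs = r from he]
    exact ⟨p, i, hm, List.isPrefixOf_iff_prefix.mp hp⟩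


-- A's chain, written with the indexed conditions (definitionally equal to get_sport's body).
def pvChainA (comb : String) : String :=
  if pvCondA comb 0 then "SOCCER (EPL)"
  else if pvCondA comb 1 then "SOCCER (LaLiga)"
  else if pvCondA comb 2 then "SOCCER (UCL)"
  else if pvCondA comb 3 then "SOCCER (SerieA)"
  else if pvCondA comb 4 then "SOCCER (Other)"
  else if pvCondA comb 5 then "SOCCER (Other)"
  else if pvCondA comb 6 then "WNBA"
  else if pvCondA comb 7 then "NBA"
  else if pvCondA comb 8 then "NFL"
  else if pvCondA comb 9 then "NHL"
  else if pvCondA comb 10 then "MLB"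
  else if pvCondA comb 11 then "TENNIS"
  else if pvCondA comb 12 then "ESPORTS"
  else if pvCondA comb 13 then "POLITICS"
  else "OTHER"

lemma pvGe (comb : String) (k n : Nat)
    (hnb : (List.range k).all (fun j => !pvCondA comb j) = true)
    (hc : pvCondA comb n = true) : k ≤ n := by
  by_contra h
  have := List.all_eq_true.mp hnb n (List.mem_range.mpr (Nat.lt_of_not_le h))
  simp [hc] at this

lemma pvKey (comb : String) (n : Nat) (hle : n ≤ 14)
    (hmin : ∀ r, pvCondA comb r = true → n ≤ r)
    (hcas : n = 14 ∨ pvCondA comb n = true) :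
    pvChainA comb = (if n < 14 then pvLabels.getD n "OTHER" else "OTHER") := by
  have hnb0 : (List.range 0).all (fun j => !pvCondA comb j) = true := rfl
  unfold pvChainA
  by_cases h0 : pvCondA comb 0 = true
  · have hb : n = 0 := by
      rcases hcas with h14 | hc
      · have := hmin 0 h0
        omega
      · exact Nat.le_antisymm (hmin 0 h0) (pvGe comb 0 n hnb0 hc)
    subst hb
    rw [if_pos h0]
    rfl
  have hnb1 : (List.range 1).all (fun j => !pvCondA comb j) = true := by
    simp [List.range_succ, eq_false_of_ne_true h0]
  by_cases h1 : pvCondA comb 1 = true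
  · have hb : n = 1 := by
      rcases hcas with h14 | hc
      · have := hmin 1 h1
        omega
      · exact Nat.le_antisymm (hmin 1 h1) (pvGe comb 1 n hnb1 hc)
    subst hb
    rw [if_neg h0, if_pos h1]
    rfl
  have hnb2 : (List.range 2).all (fun j => !pvCondA comb j) = true := by
    simp [List.range_succ, eq_false_of_ne_true h0, eq_false_of_ne_true h1]
  by_cases h2 : pvCondA comb 2 = true
  · have hb : n = 2 := by
      rcases hcas with h14 | hc
      · have := hmin 2 h2
        omega
      · exact Nat.le_antisymm (hmin 2 h2) (pvGe comb 2 n hnb2 hc)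
    subst hb
    rw [if_neg h0, if_neg h1, if_pos h2]
    rfl
  have hnb3 : (List.range 3).all (fun j => !pvCondA comb j) = true := by
    simp [List.range_succ, eq_false_of_ne_true h0, eq_false_of_ne_true h1, eq_false_of_ne_true h2]
  by_cases h3 : pvCondA comb 3 = true
  · have hb : n = 3 := by
      rcases hcas with h14 | hc
      · have := hmin 3 h3
        omega
      · exact Nat.le_antisymm (hmin 3 h3) (pvGe comb 3 n hnb3 hc)
    subst hb
    rw [if_neg h0, if_neg h1, if_neg h2, if_pos h3]
    rfl
  have hnb4 : (List.range 4).all (fun j => !pvCondA comb j) = true := by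
    simp [List.range_succ, eq_false_of_ne_true h0, eq_false_of_ne_true h1, eq_false_of_ne_true h2, eq_false_of_ne_true h3]
  by_cases h4 : pvCondA comb 4 = true
  · have hb : n = 4 := by
      rcases hcas with h14 | hc
      · have := hmin 4 h4
        omega
      · exact Nat.le_antisymm (hmin 4 h4) (pvGe comb 4 n hnb4 hc)
    subst hb
    rw [if_neg h0, if_neg h1, if_neg h2, if_neg h3, if_pos h4]
    rfl
  have hnb5 : (List.range 5).all (fun j => !pvCondA comb j) = true := by
    simp [List.range_succ, eq_false_of_ne_true h0, eq_false_of_ne_true h1, eq_false_of_ne_true h2, eq_false_of_ne_true h3, eq_false_of_ne_true h4]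
  by_cases h5 : pvCondA comb 5 = true
  · have hb : n = 5 := by
      rcases hcas with h14 | hc
      · have := hmin 5 h5
        omega
      · exact Nat.le_antisymm (hmin 5 h5) (pvGe comb 5 n hnb5 hc)
    subst hb
    rw [if_neg h0, if_neg h1, if_neg h2, if_neg h3, if_neg h4, if_pos h5]
    rfl
  have hnb6 : (List.range 6).all (fun j => !pvCondA comb j) = true := by
    simp [List.range_succ, eq_false_of_ne_true h0, eq_false_of_ne_true h1, eq_false_of_ne_true h2, eq_false_of_ne_true h3, eq_false_of_ne_true h4, eq_false_of_ne_true h5]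
  by_cases h6 : pvCondA comb 6 = true
  · have hb : n = 6 := by
      rcases hcas with h14 | hc
      · have := hmin 6 h6
        omega
      · exact Nat.le_antisymm (hmin 6 h6) (pvGe comb 6 n hnb6 hc)
    subst hb
    rw [if_neg h0, if_neg h1, if_neg h2, if_neg h3, if_neg h4, if_neg h5, if_pos h6]
    rfl
  have hnb7 : (List.range 7).all (fun j => !pvCondA comb j) = true := by
    simp [List.range_succ, eq_false_of_ne_true h0, eq_false_of_ne_true h1, eq_false_of_ne_true h2, eq_false_of_ne_true h3, eq_false_of_ne_true h4, eq_false_of_ne_true h5, eq_false_of_ne_true h6]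
  by_cases h7 : pvCondA comb 7 = true
  · have hb : n = 7 := by
      rcases hcas with h14 | hc
      · have := hmin 7 h7
        omega
      · exact Nat.le_antisymm (hmin 7 h7) (pvGe comb 7 n hnb7 hc)
    subst hb
    rw [if_neg h0, if_neg h1, if_neg h2, if_neg h3, if_neg h4, if_neg h5, if_neg h6, if_pos h7]
    rfl
  have hnb8 : (List.range 8).all (fun j => !pvCondA comb j) = true := by
    simp [List.range_succ, eq_false_of_ne_true h0, eq_false_of_ne_true h1, eq_false_of_ne_true h2, eq_false_of_ne_true h3, eq_false_of_ne_true h4, eq_false_of_ne_true h5, eq_false_of_ne_true h6, eq_false_of_ne_true h7]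
  by_cases h8 : pvCondA comb 8 = true
  · have hb : n = 8 := by
      rcases hcas with h14 | hc
      · have := hmin 8 h8
        omega
      · exact Nat.le_antisymm (hmin 8 h8) (pvGe comb 8 n hnb8 hc)
    subst hb
    rw [if_neg h0, if_neg h1, if_neg h2, if_neg h3, if_neg h4, if_neg h5, if_neg h6, if_neg h7, if_pos h8]
    rfl
  have hnb9 : (List.range 9).all (fun j => !pvCondA comb j) = true := by
    simp [List.range_succ, eq_false_of_ne_true h0, eq_false_of_ne_true h1, eq_false_of_ne_true h2, eq_false_of_ne_true h3, eq_false_of_ne_true h4, eq_false_of_ne_true h5, eq_false_of_ne_true h6, eq_false_of_ne_true h7, eq_false_of_ne_true h8]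
  by_cases h9 : pvCondA comb 9 = true
  · have hb : n = 9 := by
      rcases hcas with h14 | hc
      · have := hmin 9 h9
        omega
      · exact Nat.le_antisymm (hmin 9 h9) (pvGe comb 9 n hnb9 hc)
    subst hb
    rw [if_neg h0, if_neg h1, if_neg h2, if_neg h3, if_neg h4, if_neg h5, if_neg h6, if_neg h7, if_neg h8, if_pos h9]
    rfl
  have hnb10 : (List.range 10).all (fun j => !pvCondA comb j) = true := by
    simp [List.range_succ, eq_false_of_ne_true h0, eq_false_of_ne_true h1, eq_false_of_ne_true h2, eq_false_of_ne_true h3, eq_false_of_ne_true h4, eq_false_of_ne_true h5, eq_false_of_ne_true h6, eq_false_of_ne_true h7, eq_false_of_ne_true h8, eq_false_of_ne_true h9]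
  by_cases h10 : pvCondA comb 10 = true
  · have hb : n = 10 := by
      rcases hcas with h14 | hc
      · have := hmin 10 h10
        omega
      · exact Nat.le_antisymm (hmin 10 h10) (pvGe comb 10 n hnb10 hc)
    subst hb
    rw [if_neg h0, if_neg h1, if_neg h2, if_neg h3, if_neg h4, if_neg h5, if_neg h6, if_neg h7, if_neg h8, if_neg h9, if_pos h10]
    rfl
  have hnb11 : (List.range 11).all (fun j => !pvCondA comb j) = true := by
    simp [List.range_succ, eq_false_of_ne_true h0, eq_false_of_ne_true h1, eq_false_of_ne_true h2, eq_false_of_ne_true h3, eq_false_of_ne_true h4, eq_false_of_ne_true h5, eq_false_of_ne_true h6, eq_false_of_ne_true h7, eq_false_of_ne_true h8, eq_false_of_ne_true h9, eq_false_of_ne_true h10]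
  by_cases h11 : pvCondA comb 11 = true
  · have hb : n = 11 := by
      rcases hcas with h14 | hc
      · have := hmin 11 h11
        omega
      · exact Nat.le_antisymm (hmin 11 h11) (pvGe comb 11 n hnb11 hc)
    subst hb
    rw [if_neg h0, if_neg h1, if_neg h2, if_neg h3, if_neg h4, if_neg h5, if_neg h6, if_neg h7, if_neg h8, if_neg h9, if_neg h10, if_pos h11]
    rfl
  have hnb12 : (List.range 12).all (fun j => !pvCondA comb j) = true := by
    simp [List.range_succ, eq_false_of_ne_true h0, eq_false_of_ne_true h1, eq_false_of_ne_true h2, eq_false_of_ne_true h3, eq_false_of_ne_true h4, eq_false_of_ne_true h5, eq_false_of_ne_true h6, eq_false_of_ne_true h7, eq_false_of_ne_true h8, eq_false_of_ne_true h9, eq_false_of_ne_true h10, eq_false_of_ne_true h11]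
  by_cases h12 : pvCondA comb 12 = true
  · have hb : n = 12 := by
      rcases hcas with h14 | hc
      · have := hmin 12 h12
        omega
      · exact Nat.le_antisymm (hmin 12 h12) (pvGe comb 12 n hnb12 hc)
    subst hb
    rw [if_neg h0, if_neg h1, if_neg h2, if_neg h3, if_neg h4, if_neg h5, if_neg h6, if_neg h7, if_neg h8, if_neg h9, if_neg h10, if_neg h11, if_pos h12]
    rfl
  have hnb13 : (List.range 13).all (fun j => !pvCondA comb j) = true := by
    simp [List.range_succ, eq_false_of_ne_true h0, eq_false_of_ne_true h1, eq_false_of_ne_true h2, eq_false_of_ne_true h3, eq_false_of_ne_true h4, eq_false_of_ne_true h5, eq_false_of_ne_true h6, eq_false_of_ne_true h7, eq_false_of_ne_true h8, eq_false_of_ne_true h9, eq_false_of_ne_true h10, eq_false_of_ne_true h11, eq_false_of_ne_true h12]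
  by_cases h13 : pvCondA comb 13 = true
  · have hb : n = 13 := by
      rcases hcas with h14 | hc
      · have := hmin 13 h13
        omega
      · exact Nat.le_antisymm (hmin 13 h13) (pvGe comb 13 n hnb13 hc)
    subst hb
    rw [if_neg h0, if_neg h1, if_neg h2, if_neg h3, if_neg h4, if_neg h5, if_neg h6, if_neg h7, if_neg h8, if_neg h9, if_neg h10, if_neg h11, if_neg h12, if_pos h13]
    rfl
  have hnb14 : (List.range 14).all (fun j => !pvCondA comb j) = true := by
    simp [List.range_succ, eq_false_of_ne_true h0, eq_false_of_ne_true h1, eq_false_of_ne_true h2, eq_false_of_ne_true h3, eq_false_of_ne_true h4, eq_false_of_ne_true h5, eq_false_of_ne_true h6, eq_false_of_ne_true h7, eq_false_of_ne_true h8, eq_false_of_ne_true h9, eq_false_of_ne_true h10, eq_false_of_ne_true h11, eq_false_of_ne_true h12, eq_false_of_ne_true h13]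
  have hb : n = 14 := by
    rcases hcas with h14 | hc
    · exact h14
    · have := pvGe comb 14 n hnb14 hc
      omega
  subst hb
  rw [if_neg h0, if_neg h1, if_neg h2, if_neg h3, if_neg h4, if_neg h5, if_neg h6, if_neg h7, if_neg h8, if_neg h9, if_neg h10, if_neg h11, if_neg h12, if_neg h13]
  rfl

lemma pvMain (comb : String) :
    pvChainA comb = (if pvScan comb.toList < 14 then pvLabels.getD (pvScan comb.toList) "OTHER" else "OTHER") := by
  refine pvKey comb (pvScan comb.toList) (pvScan_le _) ?_ ?_
  · exact fun r h => pvScan_min _ r ((pvHit_iff comb r).mpr h)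
  · rcases pvScan_cases comb.toList with h | h
    · exact Or.inl h
    · exact Or.inr ((pvHit_iff comb _).mp h)

-- ===== VERDICT (by name: the statement is the Claim_ definition above) =====
theorem get_sport_spec : Claim_equal_get_sport := by
  intro row _
  show get_sport row = get_sport_alt row
  exact pvMain (PySem.Str.lower ((PySem.Dict.getD ⟨row⟩ "eventSlug" "") ++ " " ++ (PySem.Dict.getD ⟨row⟩ "slug" "") ++ " " ++ (PySem.Dict.getD ⟨row⟩ "title" "")))
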